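-- pv_equiv track=rewrite | github.com/mohamed-mahdy-bakerysoft/castle-ai-zoom-video | utils/audio_text_utils.py | find_intersecting_intervals
-- ===== SOURCE A (Python) =====
-- def has_one_second_intersection(interval1, interval2):
--     # Unpack the tuples
--     start1, end1 = interval1
--     start2, end2 = interval2
--
--     # Find intersection
--     intersection_start = max(start1, start2)
--     intersection_end = min(end1, end2)
--
--     # Check if intersection is at least 1 second
--     return intersection_end - intersection_start >= 1
--
-- def find_intersecting_intervals(broll_boundaries, other_times):
--     intersecting_times = []
--
--     for time_interval in other_times:
--         # Check if this interval intersects with any broll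
--         for broll in broll_boundaries:
--             if has_one_second_intersection(broll, time_interval):
--                 intersecting_times.append(time_interval)
--                 break  # Once we find one intersection, we can move to next interval
--
--     return intersecting_times
-- ===== SOURCE B (Python) =====
-- def find_intersecting_intervals(broll_boundaries, other_times):
--     # Sort the non-degenerate brolls by start and precompute prefix maxima of ends;
--     # each query then needs one binary search instead of a scan over all brolls.
--     brolls = sorted([(s, e) for (s, e) in broll_boundaries if e > s], key=lambda b: b[0])
--     prefmax = []
--     best = None
--     for _, e in brolls:
--         if best is None or e > best:
--             best = e
--         prefmax.append(best)
--     out = []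
--     for (qs, qe) in other_times:
--         if qe - qs >= 1:
--             # rightmost count k of brolls with start < qe (hand-rolled bisect)
--             lo, hi = 0, len(brolls)
--             while lo < hi:
--                 mid = (lo + hi) // 2
--                 if brolls[mid][0] < qe:
--                     lo = mid + 1
--                 else:
--                     hi = mid
--             if lo > 0 and prefmax[lo - 1] > qs:
--                 out.append((qs, qe))
--     return out
-- ===== Notes on version B (the rewrite author's own statement) =====
-- stated objective: faster
-- what changed: Replaces the per-query scan over all brolls by preprocessing: filter degenerate brolls, sort by start, build prefix maxima of ends, then answer each query with one binary search plus a prefix-max comparison.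
import Mathlib
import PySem

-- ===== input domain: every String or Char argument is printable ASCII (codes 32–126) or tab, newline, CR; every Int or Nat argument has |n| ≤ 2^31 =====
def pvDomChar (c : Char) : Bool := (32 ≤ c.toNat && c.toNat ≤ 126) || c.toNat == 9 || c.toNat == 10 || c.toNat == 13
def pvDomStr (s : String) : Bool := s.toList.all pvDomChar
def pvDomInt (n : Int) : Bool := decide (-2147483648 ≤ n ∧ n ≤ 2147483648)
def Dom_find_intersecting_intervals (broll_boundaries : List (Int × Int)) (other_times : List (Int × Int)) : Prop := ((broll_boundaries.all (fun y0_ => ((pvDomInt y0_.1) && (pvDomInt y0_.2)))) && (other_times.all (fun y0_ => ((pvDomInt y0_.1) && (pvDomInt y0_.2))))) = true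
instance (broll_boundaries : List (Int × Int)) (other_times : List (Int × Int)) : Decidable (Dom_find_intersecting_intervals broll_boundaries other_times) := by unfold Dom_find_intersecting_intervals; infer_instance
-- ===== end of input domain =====

-- B replaces A's per-query scan over all brolls by filter + sort + prefix maxima + one binary search per query; objective: faster.

-- ===== PORT A =====
def has_one_second_intersection (interval1 interval2 : Int × Int) : Bool :=
  decide (min interval1.2 interval2.2 - max interval1.1 interval2.1 ≥ 1)

-- A's inner for-loop with break = first-match search over broll_boundaries (List.any)
def find_intersecting_intervals (broll_boundaries : List (Int × Int)) (other_times : List (Int × Int)) : List (Int × Int) :=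
  other_times.foldl
    (fun intersecting_times time_interval =>
      if broll_boundaries.any (fun broll => has_one_second_intersection broll time_interval) then
        intersecting_times ++ [time_interval]
      else intersecting_times) []

-- ===== PORT B =====
-- Source B line `brolls = sorted([(s, e) for (s, e) in broll_boundaries if e > s], key=lambda b: b[0])`
def pvBrolls (broll_boundaries : List (Int × Int)) : List (Int × Int) :=
  PySem.List.sorted (broll_boundaries.filter (fun b => decide (b.2 > b.1))) (fun b => b.1) false

-- one step of Source B's prefix-maximum loop: state = (best : Option Int, prefmax built so far)
def pvStep (st : Option Int × List Int) (b : Int × Int) : Option Int × List Int :=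
  let best : Int := match st.1 with
    | none => b.2
    | some m => if b.2 > m then b.2 else m
  (some best, st.2 ++ [best])

def pvPrefmax (brolls : List (Int × Int)) : List Int :=
  (brolls.foldl pvStep (none, [])).2

-- Source B's hand-rolled bisect while-loop (index mid always in range: lo ≤ mid < hi ≤ length, so getD is exact)
def pvBisect (brolls : List (Int × Int)) (x : Int) (lo hi : Nat) : Nat :=
  if lo < hi then
    let mid := (lo + hi) / 2
    if (brolls.getD mid (0, 0)).1 < x then pvBisect brolls x (mid + 1) hi
    else pvBisect brolls x lo mid
  else lo
termination_by hi - lo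
decreasing_by all_goals omega

def find_intersecting_intervals_alt (broll_boundaries : List (Int × Int)) (other_times : List (Int × Int)) : List (Int × Int) :=
  other_times.foldl
    (fun out q =>
      if q.2 - q.1 ≥ 1 then
        let k := pvBisect (pvBrolls broll_boundaries) q.2 0 (pvBrolls broll_boundaries).length
        -- prefmax[k-1]: in range since 0 < k ≤ len brolls = len prefmax, so getD is exact
        if 0 < k && decide ((pvPrefmax (pvBrolls broll_boundaries)).getD (k - 1) 0 > q.1) then out ++ [q] else out
      else out) []

-- ===== PRECONDITION & SPEC =====
def Spec_find_intersecting_intervals (broll_boundaries : List (Int × Int)) (other_times : List (Int × Int)) (out : List (Int × Int)) : Prop := out = find_intersecting_intervals_alt broll_boundaries other_times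
instance (broll_boundaries : List (Int × Int)) (other_times : List (Int × Int)) (out : List (Int × Int)) : Decidable (Spec_find_intersecting_intervals broll_boundaries other_times out) := by unfold Spec_find_intersecting_intervals; infer_instance

-- ===== CLAIM (what is proved, stated in full; the proofs are below) =====
def Claim_equal_find_intersecting_intervals : Prop := ∀ (broll_boundaries : List (Int × Int)) (other_times : List (Int × Int)), Dom_find_intersecting_intervals broll_boundaries other_times → Spec_find_intersecting_intervals broll_boundaries other_times (find_intersecting_intervals broll_boundaries other_times)

-- ===== LEMMAS AND PROOFS =====

-- binary-search invariant: on a list sorted by start, pvBisect separates starts < x from starts ≥ x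
lemma pvBisect_spec (l : List (Int × Int)) (x : Int)
    (hp : l.Pairwise (fun a b => a.1 ≤ b.1)) :
    ∀ n lo hi, hi - lo ≤ n → lo ≤ hi → hi ≤ l.length →
    (∀ i (h : i < l.length), i < lo → l[i].1 < x) →
    (∀ i (h : i < l.length), hi ≤ i → ¬ l[i].1 < x) →
    pvBisect l x lo hi ≤ l.length ∧
      (∀ i (h : i < l.length), (l[i].1 < x ↔ i < pvBisect l x lo hi)) := by
  have mono : ∀ i j (hij : i ≤ j) (hj : j < l.length), l[i].1 ≤ l[j].1 := by
    intro i j hij hj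
    rcases Nat.eq_or_lt_of_le hij with rfl | h
    · exact le_refl _
    · exact List.pairwise_iff_getElem.mp hp i j _ hj h
  intro n
  induction n with
  | zero =>
    intro lo hi h1 h2 h3 hlow hhigh
    rw [pvBisect, if_neg (by omega : ¬ lo < hi)]
    refine ⟨by omega, fun i h => ⟨fun hx => ?_, fun hil => hlow i h hil⟩⟩
    by_contra hge
    exact hhigh i h (by omega) hx
  | succ n ih =>
    intro lo hi h1 h2 h3 hlow hhigh
    by_cases hlt : lo < hi
    · have hmlen : (lo + hi) / 2 < l.length := by omega
      rw [pvBisect, if_pos hlt]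
      simp only [List.getD_eq_getElem l (0,0) hmlen]
      by_cases hc : l[(lo+hi)/2].1 < x
      · rw [if_pos hc]
        exact ih ((lo+hi)/2 + 1) hi (by omega) (by omega) h3
          (fun i h hi2 => lt_of_le_of_lt (mono i ((lo+hi)/2) (by omega) hmlen) hc) hhigh
      · rw [if_neg hc]
        exact ih lo ((lo+hi)/2) (by omega) (by omega) (by omega) hlow
          (fun i h hge hx => hc (lt_of_le_of_lt (mono ((lo+hi)/2) i hge h) hx))
    · rw [pvBisect, if_neg hlt]
      refine ⟨by omega, fun i h => ⟨fun hx => ?_, fun hil => hlow i h hil⟩⟩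
      by_contra hge
      exact hhigh i h (by omega) hx

-- spec-side view of the prefix-max loop: the maximum-so-far, threaded explicitly
def pvPm : List (Int × Int) → Int → List Int
  | [], _ => []
  | b :: t, m => (if b.2 > m then b.2 else m) :: pvPm t (if b.2 > m then b.2 else m)

lemma foldl_pvStep_some : ∀ (l : List (Int × Int)) (m : Int) (acc : List Int),
    (l.foldl pvStep (some m, acc)).2 = acc ++ pvPm l m := by
  intro l
  induction l with
  | nil => intro m acc; simp [pvPm]
  | cons b t ih =>
    intro m acc
    simp only [List.foldl_cons, pvStep, pvPm]
    rw [ih]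
    simp

lemma pvPrefmax_cons (b : Int × Int) (t : List (Int × Int)) :
    pvPrefmax (b :: t) = b.2 :: pvPm t b.2 := by
  unfold pvPrefmax
  simp only [List.foldl_cons, pvStep]
  rw [foldl_pvStep_some]
  simp

lemma pvPm_getD_gt : ∀ (l : List (Int × Int)) (m : Int) (i : Nat), i < l.length → ∀ (t : Int),
    ((pvPm l m).getD i 0 > t ↔ m > t ∨ ∃ j, ∃ hj : j < l.length, j ≤ i ∧ l[j].2 > t) := by
  intro l
  induction l with
  | nil => intro m i h; simp at h
  | cons b tl ih =>
    intro m i h t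
    cases i with
    | zero =>
      simp only [pvPm, List.getD_cons_zero]
      constructor
      · intro hx
        by_cases hb : b.2 > m
        · rw [if_pos hb] at hx; right; exact ⟨0, by simp, by omega, hx⟩
        · rw [if_neg hb] at hx; left; exact hx
      · rintro (hm | ⟨j, hj, hj0, hgt⟩)
        · split <;> omega
        · interval_cases j
          simp only [List.getElem_cons_zero] at hgt
          split <;> omega
    | succ i =>
      simp only [pvPm, List.getD_cons_succ]
      rw [ih _ i (by simpa using h) t]
      constructor
      · rintro (hm | ⟨j, hj, hji, hgt⟩)
        · by_cases hb : b.2 > m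
          · rw [if_pos hb] at hm; right; exact ⟨0, by simp, by omega, by simpa using hm⟩
          · rw [if_neg hb] at hm; left; exact hm
        · right; exact ⟨j + 1, by simpa using hj, by omega, by simpa using hgt⟩
      · rintro (hm | ⟨j, hj, hji, hgt⟩)
        · left; split <;> omega
        · cases j with
          | zero => left; simp only [List.getElem_cons_zero] at hgt; split <;> omega
          | succ j => right; exact ⟨j, by simpa using hj, by omega, by simpa using hgt⟩

-- prefmax[i] > t iff some of the first i+1 brolls has end > t
lemma pvPrefmax_gt (brolls : List (Int × Int)) (i : Nat) (hi : i < brolls.length) (t : Int) :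
    ((pvPrefmax brolls).getD i 0 > t ↔ ∃ j, ∃ hj : j < brolls.length, j ≤ i ∧ brolls[j].2 > t) := by
  cases brolls with
  | nil => simp at hi
  | cons b tl =>
    rw [pvPrefmax_cons]
    cases i with
    | zero =>
      simp only [List.getD_cons_zero]
      constructor
      · intro hx; exact ⟨0, by simp, le_refl _, by simpa using hx⟩
      · rintro ⟨j, hj, hj0, hgt⟩
        interval_cases j
        simpa using hgt
    | succ i =>
      simp only [List.getD_cons_succ]
      rw [pvPm_getD_gt _ _ i (by simpa using hi) t]
      constructor
      · rintro (hm | ⟨j, hj, hji, hgt⟩)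
        · exact ⟨0, by simp, by omega, by simpa using hm⟩
        · exact ⟨j + 1, by simpa using hj, by omega, by simpa using hgt⟩
      · rintro ⟨j, hj, hji, hgt⟩
        cases j with
        | zero => left; simpa using hgt
        | succ j => right; exact ⟨j, by simpa using hj, by omega, by simpa using hgt⟩

-- the per-query decisions of A and B coincide
lemma cond_eq (bs : List (Int × Int)) (q : Int × Int) :
    (bs.any (fun broll => has_one_second_intersection broll q)) =
    (decide (q.2 - q.1 ≥ 1) &&
      (decide (0 < pvBisect (pvBrolls bs) q.2 0 (pvBrolls bs).length) &&
        decide ((pvPrefmax (pvBrolls bs)).getD (pvBisect (pvBrolls bs) q.2 0 (pvBrolls bs).length - 1) 0 > q.1))) := by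
  have hp : (pvBrolls bs).Pairwise (fun a b => a.1 ≤ b.1) := PySem.List.sorted_pairwise _ _
  have hmem : ∀ b : Int × Int, b ∈ pvBrolls bs ↔ b ∈ bs ∧ b.2 > b.1 := by
    intro b; rw [pvBrolls, PySem.List.mem_sorted, List.mem_filter]; simp
  obtain ⟨hk1, hk2⟩ := pvBisect_spec (pvBrolls bs) q.2 hp (pvBrolls bs).length 0 (pvBrolls bs).length
    (by omega) (by omega) (le_refl _) (by omega) (by omega)
  set k := pvBisect (pvBrolls bs) q.2 0 (pvBrolls bs).length with hkdef
  rw [Bool.eq_iff_iff]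
  simp only [List.any_eq_true, Bool.and_eq_true, decide_eq_true_eq, has_one_second_intersection]
  constructor
  · rintro ⟨b, hb, hc⟩
    have h4 : q.2 - q.1 ≥ 1 ∧ b.2 - b.1 ≥ 1 ∧ b.1 < q.2 ∧ q.1 < b.2 := by
      omega
    have hbm : b ∈ pvBrolls bs := (hmem b).mpr ⟨hb, by omega⟩
    obtain ⟨j, hj, hjb⟩ := List.mem_iff_getElem.mp hbm
    have hjk : j < k := (hk2 j hj).mp (by rw [hjb]; exact h4.2.2.1)
    refine ⟨h4.1, by omega, ?_⟩
    rw [pvPrefmax_gt _ (k-1) (by omega) q.1]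
    exact ⟨j, hj, by omega, by rw [hjb]; exact h4.2.2.2⟩
  · rintro ⟨hq, hk0, hpm⟩
    rw [pvPrefmax_gt _ (k-1) (by omega) q.1] at hpm
    obtain ⟨j, hj, hjk, hgt⟩ := hpm
    have hlt : (pvBrolls bs)[j].1 < q.2 := (hk2 j hj).mpr (by omega)
    have hbm := (hmem _).mp (List.getElem_mem hj)
    refine ⟨(pvBrolls bs)[j], hbm.1, ?_⟩
    have := hbm.2
    omega

-- ===== VERDICT (by name: the statement is the Claim_ definition above) =====
theorem find_intersecting_intervals_spec : Claim_equal_find_intersecting_intervals := by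
  intro bs qs _
  unfold Spec_find_intersecting_intervals find_intersecting_intervals find_intersecting_intervals_alt
  congr 1
  funext out q
  rw [cond_eq bs q]
  by_cases h1 : q.2 - q.1 ≥ 1
  · simp only [h1, if_pos, decide_true, Bool.true_and]
  · simp [h1]
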